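-- pv_equiv track=rewrite | github.com/MumenAnbar/Automated-Linux-Unix-Command-Manual-Generation | Python Version/src/interface.py | add_newline_after_gt
-- ===== SOURCE A (Python) =====
-- def add_newline_after_gt(input_string):
--     result_string = ""
--     for char in input_string:
--         if char == '<':
--             result_string += '\n'
--         result_string += char
--         if char == '>':
--             result_string += '\n'
--     return result_string
-- ===== SOURCE B (Python) =====
-- def add_newline_after_gt(input_string):
--     return input_string.replace('<', '\n<').replace('>', '>\n')
-- ===== Notes on version B (the rewrite author's own statement) =====
-- stated objective: idiomatic
-- what changed: Replaces the character-by-character accumulator loop with two sequential str.replace substitutions ('<' -> '\n<' then '>' -> '>\n'), safe because the inserted text contains no brackets.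
import Mathlib
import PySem

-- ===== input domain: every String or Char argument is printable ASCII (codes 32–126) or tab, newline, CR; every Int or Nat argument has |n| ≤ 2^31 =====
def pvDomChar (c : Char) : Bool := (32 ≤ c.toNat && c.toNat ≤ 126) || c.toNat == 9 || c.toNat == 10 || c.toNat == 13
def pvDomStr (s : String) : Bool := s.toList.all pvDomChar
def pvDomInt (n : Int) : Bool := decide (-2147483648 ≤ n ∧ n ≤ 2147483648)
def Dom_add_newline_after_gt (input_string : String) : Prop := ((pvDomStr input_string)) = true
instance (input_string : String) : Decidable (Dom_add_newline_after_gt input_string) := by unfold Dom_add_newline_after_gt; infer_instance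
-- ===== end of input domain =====

-- B replaces A's character-by-character accumulator loop with two sequential
-- string substitutions ('<' → '\n<', then '>' → '>\n'); objective: idiomatic.

-- ===== PORT A =====
-- A's loop body: optionally prepend '\n', append the char, optionally append '\n'
def pvStepA (result_string : List Char) (char : Char) : List Char :=
  let r1 := if char = '<' then result_string ++ ['\n'] else result_string
  let r2 := r1 ++ [char]
  if char = '>' then r2 ++ ['\n'] else r2

def add_newline_after_gt (input_string : String) : String :=
  String.ofList (input_string.toList.foldl pvStepA [])

-- ===== PORT B =====
def add_newline_after_gt_alt (input_string : String) : String :=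
  PySem.Str.replace (PySem.Str.replace input_string "<" "\n<") ">" ">\n"

-- ===== PRECONDITION & SPEC =====
def Spec_add_newline_after_gt (input_string : String) (out : String) : Prop := out = add_newline_after_gt_alt input_string
instance (input_string : String) (out : String) : Decidable (Spec_add_newline_after_gt input_string out) := by unfold Spec_add_newline_after_gt; infer_instance

-- ===== CLAIM (what is proved, stated in full; the proofs are below) =====
def Claim_equal_add_newline_after_gt : Prop := ∀ (input_string : String), Dom_add_newline_after_gt input_string → Spec_add_newline_after_gt input_string (add_newline_after_gt input_string)

-- ===== LEMMAS AND PROOFS =====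

-- what A's loop appends for one character
def pvEmitA (c : Char) : List Char :=
  (if c = '<' then ['\n'] else []) ++ [c] ++ (if c = '>' then ['\n'] else [])

lemma pvStepA_eq (res : List Char) (c : Char) : pvStepA res c = res ++ pvEmitA c := by
  simp only [pvStepA, pvEmitA]
  split_ifs <;> simp

lemma pvFoldlA (l : List Char) : ∀ acc : List Char,
    l.foldl pvStepA acc = acc ++ l.flatMap pvEmitA := by
  induction l with
  | nil => intro acc; simp
  | cons c t ih =>
      intro acc
      simp only [List.foldl_cons, pvStepA_eq, ih, List.flatMap_cons, List.append_assoc]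

-- single-character old pattern: replace is a per-character flatMap
lemma pvReplaceGo_singleton (o : Char) (new : List Char) :
    ∀ (fuel : Nat) (l acc : List Char), l.length ≤ fuel →
      PySem.Chars.replace.go [o] new fuel l acc
        = acc.reverse ++ l.flatMap (fun c => if c = o then new else [c]) := by
  intro fuel
  induction fuel with
  | zero =>
      intro l acc h
      have hl : l = [] := List.eq_nil_of_length_eq_zero (Nat.le_zero.mp h)
      subst hl
      simp [PySem.Chars.replace.go]
  | succ n ih =>
      intro l acc h
      cases l with
      | nil => simp [PySem.Chars.replace.go]
      | cons c t =>
          by_cases hc : c = o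
          · subst hc
            have hpre : [c].isPrefixOf (c :: t) = true := by
              simp [List.isPrefixOf]
            simp only [PySem.Chars.replace.go, hpre, if_pos]
            rw [ih (List.drop [c].length (c :: t)) (new.reverse ++ acc) (by simpa using h)]
            simp
          · have hpre : [o].isPrefixOf (c :: t) = false := by
              simp [List.isPrefixOf]
              exact fun h' => (hc h'.symm).elim
            simp only [PySem.Chars.replace.go, hpre, Bool.false_eq_true, if_false]
            rw [ih t (c :: acc) (by simpa using h)]
            simp [hc]

lemma pvReplace_singleton (l : List Char) (o : Char) (new : List Char) :
    PySem.Chars.replace l [o] new = l.flatMap (fun c => if c = o then new else [c]) := by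
  rw [PySem.Chars.replace]
  simp only [List.isEmpty_cons, Bool.false_eq_true, if_false]
  simpa using pvReplaceGo_singleton o new l.length l [] (Nat.le_refl _)

-- composing the two single-character substitutions gives A's per-character emission
lemma pvFlatMap_comp (l : List Char) :
    (l.flatMap (fun c => if c = '<' then ['\n', '<'] else [c])).flatMap
        (fun c => if c = '>' then ['>', '\n'] else [c])
      = l.flatMap pvEmitA := by
  induction l with
  | nil => rfl
  | cons c t ih =>
      simp only [List.flatMap_cons, List.flatMap_append, ih]
      congr 1
      by_cases h1 : c = '<'
      · subst h1; decide
      · by_cases h2 : c = '>'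
        · subst h2; decide
        · simp [h1, h2, pvEmitA]

-- ===== VERDICT (by name: the statement is the Claim_ definition above) =====
theorem add_newline_after_gt_spec : Claim_equal_add_newline_after_gt := by
  intro s _
  unfold Spec_add_newline_after_gt add_newline_after_gt add_newline_after_gt_alt
  rw [← String.toList_inj, String.toList_ofList, PySem.Str.toList_replace,
    PySem.Str.toList_replace]
  rw [pvFoldlA]
  rw [show ("<" : String).toList = ['<'] from rfl,
    show ("\n<" : String).toList = ['\n', '<'] from rfl,
    show (">" : String).toList = ['>'] from rfl,
    show (">\n" : String).toList = ['>', '\n'] from rfl]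
  rw [pvReplace_singleton, pvReplace_singleton, pvFlatMap_comp]
  simp
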